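-- pv_equiv track=rewrite | github.com/davep777/algorytmy | zadanie_1.py | porownanie
-- ===== SOURCE A (Python) =====
-- def porownanie(n):
--     krok = 0
--     tab = list(range(n))
--     for i in range(n):
--         for j in range(n):
--             if i != j:
--                 krok+=1
--     return krok
-- ===== SOURCE B (Python) =====
-- def porownanie(n):
--     m = max(n, 0)
--     return m * m - m
-- ===== Notes on version B (the rewrite author's own statement) =====
-- stated objective: faster
-- what changed: Replaced the O(n^2) double loop that increments a counter for every pair i!=j by the closed form m*m-m with m=max(n,0).
import Mathlib
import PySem

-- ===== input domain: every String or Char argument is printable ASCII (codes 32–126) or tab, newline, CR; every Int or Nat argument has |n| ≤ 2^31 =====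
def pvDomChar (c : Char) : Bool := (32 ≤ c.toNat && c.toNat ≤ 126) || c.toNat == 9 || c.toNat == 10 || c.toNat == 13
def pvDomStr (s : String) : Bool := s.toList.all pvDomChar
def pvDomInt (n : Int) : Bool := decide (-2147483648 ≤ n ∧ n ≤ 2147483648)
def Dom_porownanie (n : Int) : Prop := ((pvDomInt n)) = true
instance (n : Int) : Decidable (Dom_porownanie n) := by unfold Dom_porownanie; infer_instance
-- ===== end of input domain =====

-- B replaces A's O(n^2) double counting loop by the closed form m*m-m with m = max(n,0).

-- ===== PORT A =====
-- literal transliteration: krok = 0; tab = list(range(n)) (unused); double loop incrementing krok when i != j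
def porownanie (n : Int) : Int :=
  let krok : Int := 0
  let _tab := PySem.List.pyRange 0 n 1
  (PySem.List.pyRange 0 n 1).foldl
    (fun krok i =>
      (PySem.List.pyRange 0 n 1).foldl
        (fun krok j => if i ≠ j then krok + 1 else krok) krok)
    krok

-- ===== PORT B =====
def porownanie_alt (n : Int) : Int :=
  let m := max n 0
  m * m - m

-- ===== PRECONDITION & SPEC =====
def Spec_porownanie (n : Int) (out : Int) : Prop := out = porownanie_alt n
instance (n : Int) (out : Int) : Decidable (Spec_porownanie n out) := by unfold Spec_porownanie; infer_instance

-- ===== CLAIM (what is proved, stated in full; the proofs are below) =====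
def Claim_equal_porownanie : Prop := ∀ (n : Int), Dom_porownanie n → Spec_porownanie n (porownanie n)

-- ===== LEMMAS AND PROOFS =====

theorem pv_countP_ne (i : Int) (L : List Int) :
    L.countP (fun j => decide (i ≠ j)) + L.count i = L.length := by
  induction L with
  | nil => simp
  | cons x xs ih =>
    simp only [List.countP_cons, List.count_cons, List.length_cons]
    by_cases h : i = x
    · have h1 : (decide (i ≠ x)) = false := by simp [h]
      have h2 : (x == i) = true := by simp [h]
      simp only [h1, h2, if_true, Bool.false_eq_true, if_false]
      omega
    · have h1 : (decide (i ≠ x)) = true := by simp [h]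
      have h2 : (x == i) = false := by simp; exact fun hx => h hx.symm
      simp only [h1, h2, if_true, Bool.false_eq_true, if_false]
      omega

-- the inner loop adds the number of elements different from i
theorem pv_inner_foldl (i : Int) (L : List Int) (acc : Int) :
    L.foldl (fun krok j => if i ≠ j then krok + 1 else krok) acc
      = acc + (L.countP (fun j => decide (i ≠ j)) : Int) := by
  induction L generalizing acc with
  | nil => simp
  | cons x xs ih =>
    simp only [List.foldl_cons, List.countP_cons, ih]
    by_cases h : i = x
    · simp [h]
    · simp [h]; ring

-- a fold adding a constant c per element
theorem pv_const_foldl (c : Int) (L : List Int) (acc : Int) :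
    L.foldl (fun k (_ : Int) => k + c) acc = acc + (L.length : Int) * c := by
  induction L generalizing acc with
  | nil => simp
  | cons x xs ih => simp [ih]; ring

theorem porownanie_spec : Claim_equal_porownanie := by
  intro n _
  unfold Spec_porownanie porownanie porownanie_alt
  set L := PySem.List.pyRange 0 n 1 with hL
  have hnd : L.Nodup := PySem.List.nodup_pyRange_one 0 n
  have hlen : L.length = (n - 0).toNat := PySem.List.length_pyRange_one 0 n
  simp only []
  have hcong : L.foldl
      (fun krok i => L.foldl (fun krok j => if i ≠ j then krok + 1 else krok) krok) 0
      = L.foldl (fun k (_ : Int) => k + ((L.length : Int) - 1)) 0 := by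
    apply PySem.List.foldl_congr_mem
    intro acc i hi
    rw [pv_inner_foldl]
    have h1 : L.count i = 1 := List.count_eq_one_of_mem hnd hi
    have h2 := pv_countP_ne i L
    have hpos : 1 ≤ L.length := List.length_pos_of_mem hi
    have hcnt : L.countP (fun j => decide (i ≠ j)) = L.length - 1 := by omega
    rw [hcnt]
    push_cast [Nat.cast_sub hpos]
    ring
  rw [hcong, pv_const_foldl]
  rcases le_or_gt n 0 with h | h
  · have hnil : L = [] := PySem.List.pyRange_one_eq_nil h
    have hm : max n 0 = 0 := by omega
    simp [hnil, hm]
  · have h1 : (L.length : Int) = n := by rw [hlen]; omega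
    rw [h1]
    have h2 : max n 0 = n := by omega
    rw [h2]; ring
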